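-- pv_equiv track=rewrite | github.com/micadam/aoc | aoc/days_2025/day02.py | _is_id_invalid
-- ===== SOURCE A (Python) =====
-- def _is_id_invalid(id: int, max_repeats: int = 2) -> bool:
--     id_str = str(id)
--
--     for repeats in range(2, min(max_repeats, len(id_str)) + 1):
--         if len(id_str) % repeats:
--             continue
--         invalid = True
--         segment_len = len(id_str) // repeats
--         for repeat_num in range(repeats - 1):
--             if (
--                 id_str[(repeat_num) * segment_len : (repeat_num + 1) * segment_len]
--                 != id_str[
--                     (repeat_num + 1) * segment_len : (repeat_num + 2) * segment_len
--                 ]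
--             ):
--                 invalid = False
--                 break
--         if invalid:
--             return True
--     return False
-- ===== SOURCE B (Python) =====
-- def _is_id_invalid(id: int, max_repeats: int = 2) -> bool:
--     id_str = str(id)
--     for repeats in range(2, min(max_repeats, len(id_str)) + 1):
--         if len(id_str) % repeats:
--             continue
--         segment_len = len(id_str) // repeats
--         if id_str == id_str[:segment_len] * repeats:
--             return True
--     return False
-- ===== Notes on version B (the rewrite author's own statement) =====
-- stated objective: simpler
-- what changed: The inner pairwise segment-comparison loop (with its invalid flag and break) is replaced by one closed-form check: the string equals its first segment repeated `repeats` times.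
import Mathlib
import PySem

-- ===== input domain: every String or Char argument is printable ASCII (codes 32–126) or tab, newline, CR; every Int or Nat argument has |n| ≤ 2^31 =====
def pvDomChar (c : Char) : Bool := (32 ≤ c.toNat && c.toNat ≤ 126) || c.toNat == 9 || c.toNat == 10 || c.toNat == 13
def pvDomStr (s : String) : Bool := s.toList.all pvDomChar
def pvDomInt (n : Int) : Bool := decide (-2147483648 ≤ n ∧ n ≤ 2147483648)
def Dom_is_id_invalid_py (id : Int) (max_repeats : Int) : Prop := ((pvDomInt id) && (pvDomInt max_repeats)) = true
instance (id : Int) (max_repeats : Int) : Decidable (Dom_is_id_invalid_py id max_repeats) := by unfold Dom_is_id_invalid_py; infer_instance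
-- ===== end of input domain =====

-- B replaces A's inner pairwise segment-comparison loop by one closed-form check
-- (string = first segment repeated); same outer loop, simpler body.

-- ===== PORT A =====
-- inner 'for repeat_num in range(repeats - 1)' with its break
def aInnerLoop (l : List Char) (seg : Int) : List Int → Bool
  | [] => true
  | i :: rest =>
    if PySem.List.slice l (some (i * seg)) (some ((i + 1) * seg)) ≠
        PySem.List.slice l (some ((i + 1) * seg)) (some ((i + 2) * seg)) then false
    else aInnerLoop l seg rest

-- outer 'for repeats in range(2, min(max_repeats, len(id_str)) + 1)' with early return
def aOuter (l : List Char) : List Int → Bool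
  | [] => false
  | r :: rest =>
    if PySem.Int.mod (l.length : Int) r ≠ 0 then aOuter l rest
    else if aInnerLoop l (PySem.Int.floordiv (l.length : Int) r) (PySem.List.pyRange 0 (r - 1) 1) then
      true
    else aOuter l rest

def is_id_invalid_py (id : Int) (max_repeats : Int) : Bool :=
  let l := (PySem.Int.toStr id).toList
  aOuter l (PySem.List.pyRange 2 (min max_repeats (l.length : Int) + 1) 1)

-- ===== PORT B =====
-- same candidate loop, but the check is 'id_str == id_str[:segment_len] * repeats'
def bOuter (l : List Char) : List Int → Bool
  | [] => false
  | r :: rest =>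
    if PySem.Int.mod (l.length : Int) r ≠ 0 then bOuter l rest
    else
      let seg := PySem.Int.floordiv (l.length : Int) r
      if l = (List.replicate r.toNat (PySem.List.slice l none (some seg))).flatten then true
      else bOuter l rest

def is_id_invalid_py_alt (id : Int) (max_repeats : Int) : Bool :=
  let l := (PySem.Int.toStr id).toList
  bOuter l (PySem.List.pyRange 2 (min max_repeats (l.length : Int) + 1) 1)

-- ===== PRECONDITION & SPEC =====
def Spec_is_id_invalid_py (id : Int) (max_repeats : Int) (out : Bool) : Prop := out = is_id_invalid_py_alt id max_repeats
instance (id : Int) (max_repeats : Int) (out : Bool) : Decidable (Spec_is_id_invalid_py id max_repeats out) := by unfold Spec_is_id_invalid_py; infer_instance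

-- ===== CLAIM (what is proved, stated in full; the proofs are below) =====
def Claim_equal_is_id_invalid_py : Prop := ∀ (id : Int) (max_repeats : Int), Dom_is_id_invalid_py id max_repeats → Spec_is_id_invalid_py id max_repeats (is_id_invalid_py id max_repeats)

-- ===== LEMMAS AND PROOFS =====

lemma aInnerLoop_eq_true_iff (l : List Char) (seg : Int) (ids : List Int) :
    aInnerLoop l seg ids = true ↔
      ∀ i ∈ ids, PySem.List.slice l (some (i * seg)) (some ((i + 1) * seg)) =
        PySem.List.slice l (some ((i + 1) * seg)) (some ((i + 2) * seg)) := by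
  induction ids with
  | nil => simp [aInnerLoop]
  | cons i rest ih =>
    by_cases h : PySem.List.slice l (some (i * seg)) (some ((i + 1) * seg)) =
        PySem.List.slice l (some ((i + 1) * seg)) (some ((i + 2) * seg)) <;>
      simp [aInnerLoop, h, ih]

-- a Python slice [j*seg : (j+1)*seg] as drop/take
lemma slice_chunk (l : List Char) (j segn : Nat) :
    PySem.List.slice l (some ((j : Int) * (segn : Int))) (some (((j : Int) + 1) * (segn : Int)))
      = (l.drop (j * segn)).take segn := by
  have h1 : ((j : Int) * (segn : Int)) = ((j * segn : Nat) : Int) := by push_cast; ring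
  have h2 : (((j : Int) + 1) * (segn : Int)) = ((j * segn : Nat) : Int) + (segn : Int) := by
    push_cast; ring
  rw [h1, h2, PySem.List.slice_natCast_add]

lemma inner_iff (l : List Char) (segn rn : Nat) :
    (aInnerLoop l (segn : Int) (PySem.List.pyRange 0 ((rn : Int) - 1) 1) = true ↔
      ∀ j : Nat, j + 1 < rn →
        (l.drop (j * segn)).take segn = (l.drop ((j + 1) * segn)).take segn) := by
  rw [aInnerLoop_eq_true_iff]
  constructor
  · intro h j hj
    have hmem : (j : Int) ∈ PySem.List.pyRange 0 ((rn : Int) - 1) 1 := by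
      rw [PySem.List.mem_pyRange_one]; omega
    have := h (j : Int) hmem
    rw [slice_chunk] at this
    have h2 : ((j : Int) + 1) = (((j + 1 : Nat) : Int)) := by push_cast; ring
    have h3 : ((j : Int) + 2) = (((j + 1 : Nat) : Int)) + 1 := by push_cast; ring
    rw [h2, h3, slice_chunk] at this
    exact this
  · intro h i hmem
    rw [PySem.List.mem_pyRange_one] at hmem
    obtain ⟨h0, h1⟩ := hmem
    obtain ⟨j, rfl⟩ := Int.eq_ofNat_of_zero_le h0
    have hj : j + 1 < rn := by omega
    have := h j hj
    rw [slice_chunk]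
    have h2 : ((j : Int) + 1) = (((j + 1 : Nat) : Int)) := by push_cast; ring
    have h3 : ((j : Int) + 2) = (((j + 1 : Nat) : Int)) + 1 := by push_cast; ring
    rw [h2, h3, slice_chunk]
    exact this

-- adjacent chunks all equal ↔ the list is its first chunk repeated
lemma chunks_eq_iff (r : Nat) (hr : 1 ≤ r) :
    ∀ (l : List Char) (seg : Nat), l.length = r * seg →
      ((∀ j : Nat, j + 1 < r → (l.drop (j * seg)).take seg = (l.drop ((j + 1) * seg)).take seg)
        ↔ l = (List.replicate r (l.take seg)).flatten) := by
  induction r with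
  | zero => omega
  | succ n ih =>
    intro l seg hlen
    rcases Nat.eq_zero_or_pos n with hn | hn
    · subst hn
      constructor
      · intro _
        have ht : l.take seg = l := List.take_of_length_le (by omega)
        simp [ht]
      · intro _ j hj; omega
    · have hsle : seg ≤ l.length := by
        rw [hlen]; exact Nat.le_mul_of_pos_left _ (by omega)
      have hseg : (l.take seg).length = seg := by
        rw [List.length_take]; omega
      have hdroplen : (l.drop seg).length = n * seg := by
        rw [List.length_drop, hlen, Nat.succ_mul]; omega
      have hshift : ∀ j : Nat, (l.drop seg).drop (j * seg) = l.drop ((j + 1) * seg) := by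
        intro j
        rw [List.drop_drop]
        congr 1
        ring
      have IH := ih hn (l.drop seg) seg hdroplen
      constructor
      · intro h
        have hc : l.take seg = (l.drop seg).take seg := by
          have := h 0 (by omega)
          simpa using this
        have htail : ∀ j : Nat, j + 1 < n →
            ((l.drop seg).drop (j * seg)).take seg
              = ((l.drop seg).drop ((j + 1) * seg)).take seg := by
          intro j hj
          rw [hshift, hshift]
          exact h (j + 1) (by omega)
        have hdrop := IH.mp htail
        rw [List.replicate_succ, List.flatten_cons]
        rw [← hc] at hdrop
        conv_lhs => rw [← List.take_append_drop seg l]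
        rw [hdrop]
      · intro h
        have hdrop : l.drop seg = (List.replicate n (l.take seg)).flatten := by
          conv_lhs => rw [h]
          rw [List.replicate_succ, List.flatten_cons, List.drop_left' hseg]
        have hc : (l.drop seg).take seg = l.take seg := by
          rw [hdrop]
          obtain ⟨m, rfl⟩ : ∃ m, n = m + 1 := ⟨n - 1, by omega⟩
          rw [List.replicate_succ, List.flatten_cons, List.take_left' hseg]
        have htail := IH.mpr (by rw [hc]; exact hdrop)
        intro j hj
        match j with
        | 0 =>
          simpa using hc.symm
        | Nat.succ k =>
          rw [← hshift k, ← hshift (k + 1)]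
          exact htail k (by omega)

lemma outer_eq (l : List Char) :
    ∀ rs : List Int, (∀ r ∈ rs, 2 ≤ r) → aOuter l rs = bOuter l rs := by
  intro rs
  induction rs with
  | nil => intro _; rfl
  | cons r rest ih =>
    intro h
    have hr : 2 ≤ r := h r List.mem_cons_self
    have hrest : ∀ x ∈ rest, 2 ≤ x := fun x hx => h x (List.mem_cons_of_mem _ hx)
    by_cases hm : PySem.Int.mod (l.length : Int) r ≠ 0
    · simp only [aOuter, bOuter, if_pos hm, ih hrest]
    · rw [not_not] at hm
      obtain ⟨rn, rfl⟩ : ∃ rn : Nat, r = (rn : Int) := ⟨r.toNat, (Int.toNat_of_nonneg (by omega)).symm⟩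
      have hrn : 2 ≤ rn := by exact_mod_cast hr
      have hmodn : l.length % rn = 0 := by
        have := PySem.Int.mod_natCast l.length rn
        rw [hm] at this
        exact_mod_cast this.symm
      have hfd : PySem.Int.floordiv (l.length : Int) (rn : Int) = ((l.length / rn : Nat) : Int) :=
        PySem.Int.floordiv_natCast _ _
      have hlen : l.length = rn * (l.length / rn) := (Nat.mul_div_cancel' (Nat.dvd_of_mod_eq_zero hmodn)).symm
      have key : (aInnerLoop l (PySem.Int.floordiv (l.length : Int) (rn : Int))
            (PySem.List.pyRange 0 ((rn : Int) - 1) 1) = true) ↔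
          l = (List.replicate (rn : Int).toNat
            (PySem.List.slice l none (some (PySem.Int.floordiv (l.length : Int) (rn : Int))))).flatten := by
        rw [hfd, PySem.List.slice_to_natCast, Int.toNat_natCast]
        rw [inner_iff l (l.length / rn) rn]
        exact chunks_eq_iff rn (by omega) l (l.length / rn) hlen
      by_cases hc : aInnerLoop l (PySem.Int.floordiv (l.length : Int) (rn : Int))
          (PySem.List.pyRange 0 ((rn : Int) - 1) 1) = true
      · simp only [aOuter, bOuter, if_neg (not_not_intro hm), if_pos hc, if_pos (key.mp hc)]
      · have hcb : ¬ l = (List.replicate (rn : Int).toNat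
            (PySem.List.slice l none (some (PySem.Int.floordiv (l.length : Int) (rn : Int))))).flatten :=
          fun hx => hc (key.mpr hx)
        simp only [aOuter, bOuter, if_neg (not_not_intro hm), if_neg hc, if_neg hcb, ih hrest]

-- ===== VERDICT (by name: the statement is the Claim_ definition above) =====
theorem is_id_invalid_py_spec : Claim_equal_is_id_invalid_py := by
  intro id max_repeats _
  unfold Spec_is_id_invalid_py is_id_invalid_py is_id_invalid_py_alt
  apply outer_eq
  intro r hrm
  rw [PySem.List.mem_pyRange_one] at hrm
  omega
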